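-- pv_equiv track=rewrite | github.com/onepwnman/pygame | Tetris/tetris.py | shift_unit
-- ===== SOURCE A (Python) =====
-- def shift_unit(unit_map, direction):
--   new_pos_map = []
--   if direction == 'RIGHT':
--     for pos in unit_map:
--       new_pos_map.append((pos[0] + 1, pos[1]))
--   elif direction == 'LEFT':
--     for pos in unit_map:
--       new_pos_map.append((pos[0] - 1, pos[1]))
--   elif direction == 'DOWN':
--     for pos in unit_map:
--       new_pos_map.append((pos[0], pos[1] + 1))
--
--   return new_pos_map
-- ===== SOURCE B (Python) =====
-- def shift_unit(unit_map, direction):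
--   # Structure-of-arrays: split positions into column lists, shift one whole
--   # column, then zip the columns back together (staged passes, not per-pair).
--   if direction not in ('RIGHT', 'LEFT', 'DOWN'):
--     return []
--   xs = [p[0] for p in unit_map]
--   ys = [p[1] for p in unit_map]
--   if direction == 'DOWN':
--     ys = [y + 1 for y in ys]
--   else:
--     step = 1 if direction == 'RIGHT' else -1
--     xs = [x + step for x in xs]
--   return list(zip(xs, ys))
-- ===== Notes on version B (the rewrite author's own statement) =====
-- stated objective: alternative
-- what changed: Replaced A's three branch-local pair-building loops by a structure-of-arrays decomposition: unzip the positions into x- and y-column lists, shift the affected column as a whole list, and zip the columns back (staged whole-column passes instead of one pair-at-a-time loop per branch).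
import Mathlib
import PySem

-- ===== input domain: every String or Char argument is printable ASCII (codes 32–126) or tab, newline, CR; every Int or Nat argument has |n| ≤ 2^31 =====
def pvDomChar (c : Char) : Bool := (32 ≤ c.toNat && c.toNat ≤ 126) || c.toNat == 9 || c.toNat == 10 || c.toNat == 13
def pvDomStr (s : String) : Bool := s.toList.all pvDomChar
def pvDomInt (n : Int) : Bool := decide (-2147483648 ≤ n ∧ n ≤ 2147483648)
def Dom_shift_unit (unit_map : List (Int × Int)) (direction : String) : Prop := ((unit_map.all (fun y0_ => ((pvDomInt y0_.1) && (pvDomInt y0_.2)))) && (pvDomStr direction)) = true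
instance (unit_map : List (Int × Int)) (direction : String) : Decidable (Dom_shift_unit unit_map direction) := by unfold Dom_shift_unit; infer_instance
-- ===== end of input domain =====

-- B replaces A's three branch-local pair-building loops by a structure-of-arrays decomposition: unzip into column lists, shift one whole column, zip back (alternative decomposition, same cost).


-- ===== PORT A =====
-- Port of A: branch per direction, each with its own append loop (foldl accumulating new_pos_map).
def shift_unit (unit_map : List (Int × Int)) (direction : String) : List (Int × Int) :=
  if direction = "RIGHT" then
    unit_map.foldl (fun acc pos => acc ++ [(pos.1 + 1, pos.2)]) []
  else if direction = "LEFT" then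
    unit_map.foldl (fun acc pos => acc ++ [(pos.1 - 1, pos.2)]) []
  else if direction = "DOWN" then
    unit_map.foldl (fun acc pos => acc ++ [(pos.1, pos.2 + 1)]) []
  else []

-- ===== PORT B =====
-- Port of B: unzip into x/y column lists, shift one whole column, zip back.
def shift_unit_alt (unit_map : List (Int × Int)) (direction : String) : List (Int × Int) :=
  if direction = "RIGHT" ∨ direction = "LEFT" ∨ direction = "DOWN" then
    let xs := unit_map.map (fun p => p.1)
    let ys := unit_map.map (fun p => p.2)
    if direction = "DOWN" then
      xs.zip (ys.map (fun y => y + 1))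
    else
      let step : Int := if direction = "RIGHT" then 1 else -1
      (xs.map (fun x => x + step)).zip ys
  else []

-- ===== PRECONDITION & SPEC =====
def Spec_shift_unit (unit_map : List (Int × Int)) (direction : String) (out : List (Int × Int)) : Prop := out = shift_unit_alt unit_map direction
instance (unit_map : List (Int × Int)) (direction : String) (out : List (Int × Int)) : Decidable (Spec_shift_unit unit_map direction out) := by unfold Spec_shift_unit; infer_instance

-- ===== CLAIM (what is proved, stated in full; the proofs are below) =====
def Claim_equal_shift_unit : Prop := ∀ (unit_map : List (Int × Int)) (direction : String), Dom_shift_unit unit_map direction → Spec_shift_unit unit_map direction (shift_unit unit_map direction)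

-- ===== LEMMAS AND PROOFS =====
theorem flatten_map_singleton {α β : Type} (f : α → β) (l : List α) :
    (l.map (fun x => [f x])).flatten = l.map f := by
  induction l with
  | nil => rfl
  | cons x xs ih => simp [ih]

theorem zip_map_map {α : Type} (f g : (Int × Int) → α) (l : List (Int × Int)) :
    (l.map f).zip (l.map g) = l.map (fun p => (f p, g p)) := by
  induction l with
  | nil => rfl
  | cons x xs ih => simp [ih]

-- ===== VERDICT (by name: the statement is the Claim_ definition above) =====
theorem shift_unit_spec : Claim_equal_shift_unit := by
  intro m d _
  unfold Spec_shift_unit shift_unit shift_unit_alt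
  by_cases h1 : d = "RIGHT"
  · simp [h1, flatten_map_singleton, zip_map_map]
  · by_cases h2 : d = "LEFT"
    · simp [h2, flatten_map_singleton, zip_map_map, Int.sub_eq_add_neg]
    · by_cases h3 : d = "DOWN"
      · simp [h3, flatten_map_singleton, zip_map_map]
      · simp [h1, h2, h3]
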